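-- pv_equiv track=rewrite | github.com/primrose101/CS322 | finite_state_machines/data_types.py | true_bool_lexer
-- ===== SOURCE A (Python) =====
-- def true_bool_lexer(string_input, index):
--     i = index
--     state_table = [[1, 7, 7, 7, 7, 7],
--                    [7, 2, 7, 7, 7, 7],
--                    [7, 7, 3, 7, 7, 7],
--                    [7, 7, 7, 4, 7, 7],
--                    [7, 7, 7, 7, 5, 7],
--                    [6, 7, 7, 7, 7, 7],
--                    [7, 7, 7, 7, 7, 7],
--                    [7, 7, 7, 7, 7, 7], ]
--
--     state = 0
--     infut = 0
--     string_length = len(string_input)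
--     while i != string_length:
--         if string_input[i] == '"':
--             infut = 0
--         elif string_input[i] == 'T':
--             infut = 1
--         elif string_input[i] == 'R':
--             infut = 2
--         elif string_input[i] == 'U':
--             infut = 3
--         elif string_input[i] == 'E':
--             infut = 4
--         else:
--             infut = 5
--         state = state_table[state][infut]
--         if state == 7:
--             break
--         i += 1
--     return i - index
-- ===== SOURCE B (Python) =====
-- def true_bool_lexer(string_input, index):
--     target = '"TRUE"'
--     i = index
--     n = len(string_input)
--     count = 0
--     for ch in target:
--         if i == n or string_input[i] != ch:
--             break
--         count += 1
--         i += 1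
--     return count
-- ===== Notes on version B (the rewrite author's own statement) =====
-- stated objective: simpler
-- what changed: A drives an 8x6 state-transition-table FSM with a char-to-symbol if/elif chain; B simply walks the literal target '"TRUE"' and counts matching characters, keeping the raw string_input[i] access so the IndexError and negative-index behaviour coincide.
import Mathlib
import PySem

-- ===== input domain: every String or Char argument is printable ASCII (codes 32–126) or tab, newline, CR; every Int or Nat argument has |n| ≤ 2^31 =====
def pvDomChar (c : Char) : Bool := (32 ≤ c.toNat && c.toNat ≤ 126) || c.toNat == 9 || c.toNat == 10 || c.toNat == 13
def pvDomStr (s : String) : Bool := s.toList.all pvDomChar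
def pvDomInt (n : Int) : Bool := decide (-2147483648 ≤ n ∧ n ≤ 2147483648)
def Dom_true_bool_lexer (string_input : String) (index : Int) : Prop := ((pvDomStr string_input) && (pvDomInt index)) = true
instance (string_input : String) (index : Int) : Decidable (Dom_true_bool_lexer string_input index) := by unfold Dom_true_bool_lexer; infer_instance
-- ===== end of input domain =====

-- B replaces A's 8×6 state-transition-table FSM by a direct scan over the literal '"TRUE"',
-- counting matched characters (objective: simpler; same cost).

-- ===== PORT A =====
-- A's state table, row by row.
def pvStateTable : List (List Int) :=
  [[1, 7, 7, 7, 7, 7],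
   [7, 2, 7, 7, 7, 7],
   [7, 7, 3, 7, 7, 7],
   [7, 7, 7, 4, 7, 7],
   [7, 7, 7, 7, 5, 7],
   [6, 7, 7, 7, 7, 7],
   [7, 7, 7, 7, 7, 7],
   [7, 7, 7, 7, 7, 7]]

-- A's if/elif chain computing `infut` from the current character.
def pvInfut (c : Char) : Int :=
  if c = '"' then 0
  else if c = 'T' then 1
  else if c = 'R' then 2
  else if c = 'U' then 3
  else if c = 'E' then 4
  else 5

-- A's while loop. `fuel` is a step bound that is never reached: the state strictly
-- increases 0→1→…→6 and state 7 breaks, so at most 7 iterations run (A's fuel is 8).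
-- `pyGet? = none` is where the Python raises IndexError (excluded by Pre_); the loop
-- returns the current i so the function stays total.
def pvALoop (fuel : Nat) (cs : List Char) (n : Int) (i : Int) (state : Int) : Int :=
  match fuel with
  | 0 => i
  | fuel + 1 =>
    if i = n then i
    else
      match PySem.List.pyGet? cs i with
      | none => i
      | some c =>
        let infut := pvInfut c
        let state' := ((PySem.List.pyGet? pvStateTable state).getD []).getD infut.toNat 7
        if state' = 7 then i
        else pvALoop fuel cs n (i + 1) state'

def true_bool_lexer (string_input : String) (index : Int) : Int :=
  pvALoop 8 string_input.toList (string_input.toList.length : Int) index 0 - index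

-- ===== PORT B =====
-- B's for-loop over the characters of the literal target, with accumulator `count`.
def pvBLoop (cs : List Char) (n : Int) : List Char → Int → Int → Int
  | [], _, count => count
  | ch :: rest, i, count =>
    if i = n then count
    else
      match PySem.List.pyGet? cs i with
      | none => count            -- Python raises IndexError here (excluded by Pre_)
      | some c =>
        if c ≠ ch then count
        else pvBLoop cs n rest (i + 1) (count + 1)

def true_bool_lexer_alt (string_input : String) (index : Int) : Int :=
  pvBLoop string_input.toList (string_input.toList.length : Int)
    ['"', 'T', 'R', 'U', 'E', '"'] index 0

-- ===== PRECONDITION & SPEC =====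
-- Pre_ excludes exactly the inputs where the Python A raises IndexError at the first
-- character access: index > len(s) or index < -len(s).
def Pre_true_bool_lexer (string_input : String) (index : Int) : Prop :=
  -(string_input.toList.length : Int) ≤ index ∧ index ≤ (string_input.toList.length : Int)
instance (string_input : String) (index : Int) : Decidable (Pre_true_bool_lexer string_input index) := by unfold Pre_true_bool_lexer; infer_instance

def pvWitness_true_bool_lexer : String × Int := ("x\"TRUE\"y", 1)

def Spec_true_bool_lexer (string_input : String) (index : Int) (out : Int) : Prop := out = true_bool_lexer_alt string_input index
instance (string_input : String) (index : Int) (out : Int) : Decidable (Spec_true_bool_lexer string_input index out) := by unfold Spec_true_bool_lexer; infer_instance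

-- ===== CLAIM (what is proved, stated in full; the proofs are below) =====
def Claim_equal_true_bool_lexer : Prop := ∀ (string_input : String) (index : Int), Dom_true_bool_lexer string_input index → Pre_true_bool_lexer string_input index → Spec_true_bool_lexer string_input index (true_bool_lexer string_input index)

-- ===== LEMMAS AND PROOFS =====

-- Shifting B's accumulator out of the loop.
theorem pvBLoop_shift (cs : List Char) (n : Int) (t : List Char) (i c : Int) :
    pvBLoop cs n t i c = c + pvBLoop cs n t i 0 := by
  induction t generalizing i c with
  | nil => simp [pvBLoop]
  | cons ch rest ih =>
    simp only [pvBLoop]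
    split
    · omega
    · cases h : PySem.List.pyGet? cs i with
      | none => simp
      | some x =>
        simp only
        split
        · simp
        · rw [ih _ (c + 1), ih _ (0 + 1)]; omega

-- Row 6 of the table is all 7s.
theorem pvRow6 (c : Char) :
    ((PySem.List.pyGet? pvStateTable 6).getD []).getD (pvInfut c).toNat 7 = 7 := by
  unfold pvInfut; split_ifs <;> decide

-- In state 6 the next lookup is always 7, so the loop stops at once.
theorem pvALoop_state6 (f : Nat) (cs : List Char) (n j : Int) :
    pvALoop (f + 1) cs n j 6 = j := by
  simp only [pvALoop]
  split
  · rfl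
  · cases h : PySem.List.pyGet? cs j with
    | none => rfl
    | some c => dsimp only; rw [pvRow6 c]; simp

-- Row 0: the lookup is 1 on '\"' and 7 on every other character.
theorem pvMatch0 :
    ((PySem.List.pyGet? pvStateTable 0).getD []).getD (pvInfut '\"').toNat 7 = 1 := by
  decide

theorem pvMiss0 : ∀ c : Char, c ≠ '\"' →
    ((PySem.List.pyGet? pvStateTable 0).getD []).getD (pvInfut c).toNat 7 = 7 := by
  intro c hne
  by_cases h0 : c = '\"'
  · exact absurd h0 hne
  by_cases h1 : c = 'T'
  · subst h1; decide
  by_cases h2 : c = 'R'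
  · subst h2; decide
  by_cases h3 : c = 'U'
  · subst h3; decide
  by_cases h4 : c = 'E'
  · subst h4; decide
  have h5 : pvInfut c = 5 := by
    unfold pvInfut; rw [if_neg h0, if_neg h1, if_neg h2, if_neg h3, if_neg h4]
  rw [h5]; decide

-- Row 1: the lookup is 2 on 'T' and 7 on every other character.
theorem pvMatch1 :
    ((PySem.List.pyGet? pvStateTable 1).getD []).getD (pvInfut 'T').toNat 7 = 2 := by
  decide

theorem pvMiss1 : ∀ c : Char, c ≠ 'T' →
    ((PySem.List.pyGet? pvStateTable 1).getD []).getD (pvInfut c).toNat 7 = 7 := by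
  intro c hne
  by_cases h0 : c = '\"'
  · subst h0; decide
  by_cases h1 : c = 'T'
  · exact absurd h1 hne
  by_cases h2 : c = 'R'
  · subst h2; decide
  by_cases h3 : c = 'U'
  · subst h3; decide
  by_cases h4 : c = 'E'
  · subst h4; decide
  have h5 : pvInfut c = 5 := by
    unfold pvInfut; rw [if_neg h0, if_neg h1, if_neg h2, if_neg h3, if_neg h4]
  rw [h5]; decide

-- Row 2: the lookup is 3 on 'R' and 7 on every other character.
theorem pvMatch2 :
    ((PySem.List.pyGet? pvStateTable 2).getD []).getD (pvInfut 'R').toNat 7 = 3 := by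
  decide

theorem pvMiss2 : ∀ c : Char, c ≠ 'R' →
    ((PySem.List.pyGet? pvStateTable 2).getD []).getD (pvInfut c).toNat 7 = 7 := by
  intro c hne
  by_cases h0 : c = '\"'
  · subst h0; decide
  by_cases h1 : c = 'T'
  · subst h1; decide
  by_cases h2 : c = 'R'
  · exact absurd h2 hne
  by_cases h3 : c = 'U'
  · subst h3; decide
  by_cases h4 : c = 'E'
  · subst h4; decide
  have h5 : pvInfut c = 5 := by
    unfold pvInfut; rw [if_neg h0, if_neg h1, if_neg h2, if_neg h3, if_neg h4]
  rw [h5]; decide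

-- Row 3: the lookup is 4 on 'U' and 7 on every other character.
theorem pvMatch3 :
    ((PySem.List.pyGet? pvStateTable 3).getD []).getD (pvInfut 'U').toNat 7 = 4 := by
  decide

theorem pvMiss3 : ∀ c : Char, c ≠ 'U' →
    ((PySem.List.pyGet? pvStateTable 3).getD []).getD (pvInfut c).toNat 7 = 7 := by
  intro c hne
  by_cases h0 : c = '\"'
  · subst h0; decide
  by_cases h1 : c = 'T'
  · subst h1; decide
  by_cases h2 : c = 'R'
  · subst h2; decide
  by_cases h3 : c = 'U'
  · exact absurd h3 hne
  by_cases h4 : c = 'E'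
  · subst h4; decide
  have h5 : pvInfut c = 5 := by
    unfold pvInfut; rw [if_neg h0, if_neg h1, if_neg h2, if_neg h3, if_neg h4]
  rw [h5]; decide

-- Row 4: the lookup is 5 on 'E' and 7 on every other character.
theorem pvMatch4 :
    ((PySem.List.pyGet? pvStateTable 4).getD []).getD (pvInfut 'E').toNat 7 = 5 := by
  decide

theorem pvMiss4 : ∀ c : Char, c ≠ 'E' →
    ((PySem.List.pyGet? pvStateTable 4).getD []).getD (pvInfut c).toNat 7 = 7 := by
  intro c hne
  by_cases h0 : c = '\"'
  · subst h0; decide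
  by_cases h1 : c = 'T'
  · subst h1; decide
  by_cases h2 : c = 'R'
  · subst h2; decide
  by_cases h3 : c = 'U'
  · subst h3; decide
  by_cases h4 : c = 'E'
  · exact absurd h4 hne
  have h5 : pvInfut c = 5 := by
    unfold pvInfut; rw [if_neg h0, if_neg h1, if_neg h2, if_neg h3, if_neg h4]
  rw [h5]; decide

-- Row 5: the lookup is 6 on '\"' and 7 on every other character.
theorem pvMatch5 :
    ((PySem.List.pyGet? pvStateTable 5).getD []).getD (pvInfut '\"').toNat 7 = 6 := by
  decide

theorem pvMiss5 : ∀ c : Char, c ≠ '\"' →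
    ((PySem.List.pyGet? pvStateTable 5).getD []).getD (pvInfut c).toNat 7 = 7 := by
  intro c hne
  by_cases h0 : c = '\"'
  · exact absurd h0 hne
  by_cases h1 : c = 'T'
  · subst h1; decide
  by_cases h2 : c = 'R'
  · subst h2; decide
  by_cases h3 : c = 'U'
  · subst h3; decide
  by_cases h4 : c = 'E'
  · subst h4; decide
  have h5 : pvInfut c = 5 := by
    unfold pvInfut; rw [if_neg h0, if_neg h1, if_neg h2, if_neg h3, if_neg h4]
  rw [h5]; decide

-- One step of A's loop in state k (expecting `ch`) matches one step of B's loop.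
theorem pvAstep (cs : List Char) (n i : Int) (f : Nat) (k : Int) (ch : Char) (rest : List Char)
    (hmatch : ((PySem.List.pyGet? pvStateTable k).getD []).getD (pvInfut ch).toNat 7 = k + 1)
    (hmiss : ∀ c : Char, c ≠ ch →
        ((PySem.List.pyGet? pvStateTable k).getD []).getD (pvInfut c).toNat 7 = 7)
    (hk7 : k + 1 ≠ (7 : Int))
    (hnext : ∀ j : Int, pvALoop f cs n j (k + 1) = j + pvBLoop cs n rest j 0) :
    pvALoop (f + 1) cs n i k = i + pvBLoop cs n (ch :: rest) i 0 := by
  simp only [pvALoop, pvBLoop]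
  split
  · omega
  · cases h : PySem.List.pyGet? cs i with
    | none => dsimp only; omega
    | some c =>
      dsimp only
      by_cases hc : c = ch
      · subst hc
        rw [hmatch, if_neg hk7, hnext (i + 1), pvBLoop_shift cs n rest (i + 1) (0 + 1)]
        simp
        omega
      · rw [hmiss c hc]
        simp [hc]

-- Chaining the six steps, state 5 down to state 0.
theorem pvA5 (cs : List Char) (n i : Int) :
    pvALoop 3 cs n i 5 = i + pvBLoop cs n ['\"'] i 0 := by
  refine pvAstep cs n i 2 5 '\"' [] pvMatch5 pvMiss5 (by omega) ?_
  intro j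
  simpa [pvBLoop] using pvALoop_state6 1 cs n j

theorem pvA4 (cs : List Char) (n i : Int) :
    pvALoop 4 cs n i 4 = i + pvBLoop cs n ['E', '\"'] i 0 :=
  pvAstep cs n i 3 4 'E' ['\"'] pvMatch4 pvMiss4 (by omega) (pvA5 cs n)

theorem pvA3 (cs : List Char) (n i : Int) :
    pvALoop 5 cs n i 3 = i + pvBLoop cs n ['U', 'E', '\"'] i 0 :=
  pvAstep cs n i 4 3 'U' ['E', '\"'] pvMatch3 pvMiss3 (by omega) (pvA4 cs n)

theorem pvA2 (cs : List Char) (n i : Int) :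
    pvALoop 6 cs n i 2 = i + pvBLoop cs n ['R', 'U', 'E', '\"'] i 0 :=
  pvAstep cs n i 5 2 'R' ['U', 'E', '\"'] pvMatch2 pvMiss2 (by omega) (pvA3 cs n)

theorem pvA1 (cs : List Char) (n i : Int) :
    pvALoop 7 cs n i 1 = i + pvBLoop cs n ['T', 'R', 'U', 'E', '\"'] i 0 :=
  pvAstep cs n i 6 1 'T' ['R', 'U', 'E', '\"'] pvMatch1 pvMiss1 (by omega) (pvA2 cs n)

theorem pvA0 (cs : List Char) (n i : Int) :
    pvALoop 8 cs n i 0 = i + pvBLoop cs n ['\"', 'T', 'R', 'U', 'E', '\"'] i 0 :=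
  pvAstep cs n i 7 0 '\"' ['T', 'R', 'U', 'E', '\"'] pvMatch0 pvMiss0 (by omega) (pvA1 cs n)

-- ===== VERDICT (by name: the statement is the Claim_ definition above) =====
theorem true_bool_lexer_spec : Claim_equal_true_bool_lexer := by
  intro s index _ _
  unfold Spec_true_bool_lexer true_bool_lexer true_bool_lexer_alt
  rw [pvA0]
  omega
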